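-- pv_equiv track=rewrite | github.com/tnotesjs/TNotes.leetcode | notes/1318. 或运算的最小翻转次数【中等】/solutions/1/1.py | minFlips
-- ===== SOURCE A (Python) =====
-- def minFlips(a: int, b: int, c: int) -> int:
--     flips = 0
--     for i in range(30):
--         bit_a = (a >> i) & 1
--         bit_b = (b >> i) & 1
--         bit_c = (c >> i) & 1
--         if bit_c == 1:
--             if bit_a == 0 and bit_b == 0:
--                 flips += 1
--         else:
--             flips += bit_a + bit_b
--     return flips
-- ===== SOURCE B (Python) =====
-- def minFlips(a: int, b: int, c: int) -> int:
--     mask = (1 << 30) - 1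
--     a &= mask
--     b &= mask
--     c &= mask
--     return (c & ~(a | b)).bit_count() + (a & ~c).bit_count() + (b & ~c).bit_count()
-- ===== Notes on version B (the rewrite author's own statement) =====
-- stated objective: simpler
-- what changed: Replaces A's 30-iteration per-bit loop (extract each bit of a, b, c and branch) by three whole-word bitwise expressions on 30-bit-masked values whose popcounts are summed: c&~(a|b) (bits to set), a&~c and b&~c (bits to clear).
import Mathlib
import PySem

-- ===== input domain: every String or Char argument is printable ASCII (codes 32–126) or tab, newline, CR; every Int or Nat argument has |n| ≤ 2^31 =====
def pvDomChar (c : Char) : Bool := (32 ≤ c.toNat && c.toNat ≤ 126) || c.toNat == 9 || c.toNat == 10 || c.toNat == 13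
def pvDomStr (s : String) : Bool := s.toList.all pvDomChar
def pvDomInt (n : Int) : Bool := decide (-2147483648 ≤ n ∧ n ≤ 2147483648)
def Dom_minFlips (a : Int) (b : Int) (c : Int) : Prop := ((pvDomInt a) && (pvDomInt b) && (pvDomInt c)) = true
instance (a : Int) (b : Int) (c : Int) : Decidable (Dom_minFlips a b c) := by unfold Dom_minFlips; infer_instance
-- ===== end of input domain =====

-- ===== PORT A =====
-- B replaces A's 30-iteration per-bit loop by three whole-word popcounts on 30-bit-masked values (simpler).
def minFlips (a : Int) (b : Int) (c : Int) : Int :=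
  (PySem.List.pyRange 0 30).foldl (fun flips i =>
    let bit_a := PySem.Int.band (a >>> i.toNat) 1
    let bit_b := PySem.Int.band (b >>> i.toNat) 1
    let bit_c := PySem.Int.band (c >>> i.toNat) 1
    if bit_c = 1 then
      if bit_a = 0 ∧ bit_b = 0 then flips + 1 else flips
    else flips + bit_a + bit_b) 0

-- ===== PORT B =====
def minFlips_alt (a : Int) (b : Int) (c : Int) : Int :=
  let mask : Int := (1 <<< 30) - 1
  let a' := PySem.Int.band a mask
  let b' := PySem.Int.band b mask
  let c' := PySem.Int.band c mask
  ((PySem.Int.bitCount (PySem.Int.band c' (Int.not (PySem.Int.bor a' b'))) : Int)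
    + (PySem.Int.bitCount (PySem.Int.band a' (Int.not c')) : Int)
    + (PySem.Int.bitCount (PySem.Int.band b' (Int.not c')) : Int))

-- ===== PRECONDITION & SPEC =====
def Spec_minFlips (a : Int) (b : Int) (c : Int) (out : Int) : Prop := out = minFlips_alt a b c
instance (a : Int) (b : Int) (c : Int) (out : Int) : Decidable (Spec_minFlips a b c out) := by unfold Spec_minFlips; infer_instance

-- ===== CLAIM (what is proved, stated in full; the proofs are below) =====
def Claim_equal_minFlips : Prop := ∀ (a : Int) (b : Int) (c : Int), Dom_minFlips a b c → Spec_minFlips a b c (minFlips a b c)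

-- ===== LEMMAS AND PROOFS =====

-- the cost A's loop body adds for bit 0
def costI (a b c : Int) : Int :=
  if PySem.Int.band c 1 = 1 then
    (if PySem.Int.band a 1 = 0 ∧ PySem.Int.band b 1 = 0 then 1 else 0)
  else PySem.Int.band a 1 + PySem.Int.band b 1

-- A's loop, reorganised as recursion on the number of bits, halving the arguments
def T : Nat → Int → Int → Int → Int
  | 0, _, _, _ => 0
  | n+1, a, b, c => costI a b c + T n (a >>> (1:Nat)) (b >>> (1:Nat)) (c >>> (1:Nat))

-- the low n bits of a, as a Nat
def msk (n : Nat) (a : Int) : Nat := (a % ((2:Int)^n)).toNat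

-- B's three popcounts, parametrised by the bit width
def E (n : Nat) (a b c : Int) : Int :=
  ((PySem.Int.bitCount ↑(msk n c - (msk n c &&& (msk n a ||| msk n b))) : Int)
    + (PySem.Int.bitCount ↑(msk n a - (msk n a &&& msk n c)) : Int)
    + (PySem.Int.bitCount ↑(msk n b - (msk n b &&& msk n c)) : Int))

lemma and_mod_two (a b : Nat) : (a &&& b) % 2 = (a % 2) &&& (b % 2) := by
  have h := Nat.and_mod_two_eq_one (a := a) (b := b)
  rcases Nat.mod_two_eq_zero_or_one a with h1 | h1 <;>
    rcases Nat.mod_two_eq_zero_or_one b with h2 | h2 <;>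
      rw [h1, h2] <;> simp only [Nat.reduceAnd] <;> omega

lemma or_mod_two (a b : Nat) : (a ||| b) % 2 = (a % 2) ||| (b % 2) := by
  have h := Nat.or_mod_two_eq_one (a := a) (b := b)
  rcases Nat.mod_two_eq_zero_or_one a with h1 | h1 <;>
    rcases Nat.mod_two_eq_zero_or_one b with h2 | h2 <;>
      rw [h1, h2] <;> simp only [Nat.reduceOr] <;> omega

lemma and_mod_two_le (z u : Nat) : (z &&& u) % 2 ≤ z % 2 := by
  have h := and_mod_two z u
  rcases Nat.mod_two_eq_zero_or_one z with h1 | h1 <;>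
    rcases Nat.mod_two_eq_zero_or_one u with h2 | h2 <;>
      rw [h1, h2] at h <;> simp only [Nat.reduceAnd] at h <;> omega

lemma sub_and_mod_two (z u : Nat) : (z - (z &&& u)) % 2 = z % 2 - ((z % 2) &&& (u % 2)) := by
  have hle : z &&& u ≤ z := Nat.and_le_left
  have hm := and_mod_two z u
  have h2 := and_mod_two_le z u
  omega

lemma sub_and_div_two (z u : Nat) : (z - (z &&& u)) / 2 = z / 2 - ((z / 2) &&& (u / 2)) := by
  have hle : z &&& u ≤ z := Nat.and_le_left
  have h2 := and_mod_two_le z u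
  have hd : (z &&& u) / 2 = (z / 2) &&& (u / 2) := Nat.and_div_two
  omega

lemma bc_half (w : Nat) : PySem.Int.bitCount ↑w = w % 2 + PySem.Int.bitCount ↑(w / 2) := by
  rcases Nat.eq_zero_or_pos w with h | h
  · subst h; simp [PySem.Int.bitCount_zero]
  · exact PySem.Int.bitCount_natCast h

lemma bandNotCast (z u : Nat) : PySem.Int.band ↑z (Int.not ↑u) = ↑(z - (z &&& u)) := by
  have h0 : ¬ (0 ≤ -(u:Int) - 1) := by omega
  have h1 : (-(-(u : Int) - 1) - 1) = (u : Int) := by ring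
  rw [show Int.not (u:Int) = -(u:Int) - 1 by simp [Int.not, Int.negSucc_eq]; omega]
  rw [PySem.Int.band, if_pos (by positivity : (0:Int) ≤ (z:Int)), if_neg h0, h1]
  simp

lemma band_mask (a : Int) : PySem.Int.band a ((1 <<< 30) - 1) = ↑(msk 30 a) := by
  have hm : ((1 <<< 30 : Int) - 1) = ((1073741823 : Nat) : Int) := by decide
  rw [hm]
  by_cases h : 0 ≤ a
  · rw [PySem.Int.band_of_nonneg h (by omega)]
    have he : a.toNat &&& ((1073741823 : Nat) : Int).toNat = a.toNat % 2 ^ 30 :=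
      Nat.and_two_pow_sub_one_eq_mod a.toNat 30
    rw [he]
    unfold msk; norm_num; omega
  · rw [PySem.Int.band, if_neg h, if_pos (by omega : (0:Int) ≤ ((1073741823 : Nat) : Int))]
    have he : ((1073741823 : Nat) : Int).toNat &&& (-a - 1).toNat = (-a - 1).toNat % 2 ^ 30 := by
      rw [Nat.and_comm]; exact Nat.and_two_pow_sub_one_eq_mod _ 30
    rw [he]
    unfold msk; norm_num; omega

lemma B_eq_E (a b c : Int) : minFlips_alt a b c = E 30 a b c := by
  simp only [minFlips_alt, band_mask, PySem.Int.bor_natCast, bandNotCast, E]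

lemma msk_zero (a : Int) : msk 0 a = 0 := by
  unfold msk; simp

lemma msk_mod_two (n : Nat) (a : Int) : ((msk (n+1) a % 2 : Nat) : Int) = a % 2 := by
  have hcast : ((msk (n+1) a % 2 : Nat) : Int) = ((msk (n+1) a : Nat) : Int) % 2 := by push_cast; ring_nf
  rw [hcast]
  unfold msk
  have hpos : (0:Int) < 2 ^ (n+1) := by positivity
  have hnn : 0 ≤ a % 2^(n+1) := Int.emod_nonneg a (by omega)
  have hdvd : (a % 2^(n+1)) % 2 = a % 2 := by
    rw [show ((2:Int)^(n+1)) = 2 * 2^n by ring]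
    exact Int.emod_emod_of_dvd a ⟨2^n, by ring⟩
  omega

lemma msk_div_two (n : Nat) (a : Int) : msk (n+1) a / 2 = msk n (a >>> (1:Nat)) := by
  have hs : a >>> (1:Nat) = a / 2 := by
    have := Int.shiftRight_eq_div_pow a 1
    simpa using this
  unfold msk
  rw [hs]
  have hk : (0:Int) < 2^n := by positivity
  set k : Int := 2^n with hkdef
  rw [show ((2:Int)^(n+1)) = 2 * k by rw [hkdef]; ring]
  set r : Int := a % (2 * k) with hrdef
  have hr0 : 0 ≤ r := Int.emod_nonneg a (by omega)
  have hr1 : r < 2 * k := Int.emod_lt_of_pos a (by omega)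
  set q : Int := a / (2 * k) with hqdef
  have ha : a = 2 * (k * q) + r := by
    have h := Int.mul_ediv_add_emod a (2 * k)
    rw [← hrdef, ← hqdef] at h
    linarith [h]
  have hdiv2 : a / 2 = k * q + r / 2 := by omega
  have hmod : (a / 2) % k = r / 2 := by
    rw [hdiv2, add_comm, Int.add_mul_emod_self_left]
    exact Int.emod_eq_of_lt (by omega) (by omega)
  rw [hmod]
  omega

lemma head_cost (n : Nat) (a b c : Int) :
    ((msk (n+1) c % 2 - (msk (n+1) c % 2 &&& (msk (n+1) a % 2 ||| msk (n+1) b % 2)) : Nat) : Int)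
      + ((msk (n+1) a % 2 - (msk (n+1) a % 2 &&& msk (n+1) c % 2) : Nat) : Int)
      + ((msk (n+1) b % 2 - (msk (n+1) b % 2 &&& msk (n+1) c % 2) : Nat) : Int)
    = costI a b c := by
  have ha := msk_mod_two n a
  have hb := msk_mod_two n b
  have hc := msk_mod_two n c
  have ha2 : msk (n+1) a % 2 < 2 := Nat.mod_lt _ (by omega)
  have hb2 : msk (n+1) b % 2 < 2 := Nat.mod_lt _ (by omega)
  have hc2 : msk (n+1) c % 2 < 2 := Nat.mod_lt _ (by omega)
  unfold costI
  rw [PySem.Int.band_one, PySem.Int.band_one, PySem.Int.band_one,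
      PySem.Int.mod_eq_emod_of_pos (by omega), PySem.Int.mod_eq_emod_of_pos (by omega),
      PySem.Int.mod_eq_emod_of_pos (by omega), ← ha, ← hb, ← hc]
  clear ha hb hc
  set pa := msk (n+1) a % 2
  set pb := msk (n+1) b % 2
  set pc := msk (n+1) c % 2
  interval_cases pa <;> interval_cases pb <;> interval_cases pc <;> decide

lemma key (n : Nat) : ∀ a b c : Int, E n a b c = T n a b c := by
  induction n with
  | zero =>
    intro a b c
    simp [E, T, msk_zero, PySem.Int.bitCount_zero]
  | succ n ih =>
    intro a b c
    unfold E
    rw [bc_half (msk (n+1) c - _), bc_half (msk (n+1) a - _), bc_half (msk (n+1) b - _)]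
    rw [sub_and_div_two, sub_and_div_two, sub_and_div_two]
    rw [sub_and_mod_two, sub_and_mod_two, sub_and_mod_two]
    rw [Nat.or_div_two, or_mod_two]
    rw [msk_div_two, msk_div_two, msk_div_two]
    have hh := head_cost n a b c
    have hE := ih (a >>> (1:Nat)) (b >>> (1:Nat)) (c >>> (1:Nat))
    rw [show T (n+1) a b c = costI a b c + T n (a >>> (1:Nat)) (b >>> (1:Nat)) (c >>> (1:Nat)) from rfl]
    rw [← hh, ← hE]
    unfold E
    push_cast
    ring

lemma shift_succ (a : Int) (k : Nat) : a >>> (k+1) = (a >>> (1:Nat)) >>> k := by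
  rw [Int.shiftRight_eq_div_pow, Int.shiftRight_eq_div_pow, Int.shiftRight_eq_div_pow,
      Int.ediv_ediv_of_nonneg (by positivity)]
  congr 1
  push_cast
  ring

-- A's loop body, named
def bodyA (a b c : Int) (flips : Int) (i : Int) : Int :=
  let bit_a := PySem.Int.band (a >>> i.toNat) 1
  let bit_b := PySem.Int.band (b >>> i.toNat) 1
  let bit_c := PySem.Int.band (c >>> i.toNat) 1
  if bit_c = 1 then
    if bit_a = 0 ∧ bit_b = 0 then flips + 1 else flips
  else flips + bit_a + bit_b

lemma foldA (n : Nat) : ∀ a b c acc : Int,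
    (List.range n).foldl (fun (acc : Int) (k : Nat) => bodyA a b c acc (k : Int)) acc = acc + T n a b c := by
  induction n with
  | zero => intro a b c acc; simp [T]
  | succ n ih =>
    intro a b c acc
    rw [List.range_succ_eq_map, List.foldl_cons, List.foldl_map]
    have hfun : (fun (acc : Int) (k : Nat) => bodyA a b c acc ((Nat.succ k : Nat) : Int))
        = (fun (acc : Int) (k : Nat) =>
            bodyA (a >>> (1:Nat)) (b >>> (1:Nat)) (c >>> (1:Nat)) acc ((k : Nat) : Int)) := by
      funext acc k
      simp only [bodyA, Int.toNat_natCast, Nat.succ_eq_add_one]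
      simp only [shift_succ a k, shift_succ b k, shift_succ c k]
      rfl
    rw [hfun, ih]
    have hhead : bodyA a b c acc ((0:Nat) : Int) = acc + costI a b c := by
      simp only [bodyA, costI, Nat.cast_zero, Int.toNat_zero, Int.shiftRight_zero]
      split_ifs <;> omega
    rw [hhead, show T (n+1) a b c = costI a b c + T n (a >>> (1:Nat)) (b >>> (1:Nat)) (c >>> (1:Nat)) from rfl]
    ring

lemma A_eq_T (a b c : Int) : minFlips a b c = T 30 a b c := by
  have h0 : minFlips a b c = (PySem.List.pyRange 0 30).foldl (bodyA a b c) 0 := by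
    simp only [minFlips]
    congr 1
    funext flips i
    simp only [bodyA, Int.shiftRight_natCast_right]
  rw [h0, show (30:Int) = ((30:Nat):Int) by norm_num, PySem.List.pyRange_zero_natCast,
      List.foldl_map, foldA 30 a b c 0]
  ring

-- ===== VERDICT (by name: the statement is the Claim_ definition above) =====
theorem minFlips_spec : Claim_equal_minFlips := by
  intro a b c _
  unfold Spec_minFlips
  rw [A_eq_T, B_eq_E, key]
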